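-- pv_equiv track=rewrite | github.com/createdreallol/Baseball-Sign-Predictor | WSC/WSC.py | GetResInps
-- ===== SOURCE A (Python) =====
-- def GetResInps(res, el):
--     ret = []
--     resLoc = res[0]
--
--     while resLoc <= res[1]:
--         # This will add every element to every element in the domain, creating every possible correlation with a resolution of 2
--         if resLoc == 1:
--             for i in el:
--                 ret.append(i)
--
--         # This will add every element to every element in the domain, creating every possible correlation with a resolution of 2
--         if resLoc == 2:
--             for i in el:
--                 for j in el:
--                     ret.append(i+j)
--
--         # This will add every element to every element in the domain, creating every possible correlation with a resolution of 3
--         if resLoc == 3: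
--             for i in el:
--                 for j in el:
--                     for k in el:
--                         ret.append(i+j+k)
--
--         # This will add every element to every element in the domain, creating every possible correlation with a resolution of 3
--         if resLoc == 4:
--             for i in el:
--                 for j in el:
--                     for k in el:
--                         for l in el:
--                             ret.append(i+j+k+l)
--
--         # This will add every element to every element in the domain, creating every possible correlation with a resolution of 3
--         if resLoc == 5:
--             for i in el:
--                 for j in el:
--                     for k in el:
--                         for l in el:
--                             for o in el:
--                                 ret.append(i+j+k+l+o)
--
--         # Incriment the resolution location we are looking at
--         resLoc += 1
--
--     return ret
-- ===== SOURCE B (Python) =====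
-- def GetResInps(res, el):
--     # Single clamped pass: grow k-letter concatenations once per resolution k in 1..5.
--     ret = []
--     for k in range(max(res[0], 1), min(res[1], 5) + 1):
--         words = [""]
--         for _ in range(k):
--             words = [w + e for w in words for e in el]
--         ret.extend(words)
--     return ret
-- ===== Notes on version B (the rewrite author's own statement) =====
-- stated objective: simpler
-- what changed: Replaces the five hard-coded nested-loop towers inside an unbounded while over the whole resolution range by one loop over the range clamped to 1..5 that grows the list of k-fold concatenations iteratively (words = [w+e ...] applied k times).
import Mathlib
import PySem

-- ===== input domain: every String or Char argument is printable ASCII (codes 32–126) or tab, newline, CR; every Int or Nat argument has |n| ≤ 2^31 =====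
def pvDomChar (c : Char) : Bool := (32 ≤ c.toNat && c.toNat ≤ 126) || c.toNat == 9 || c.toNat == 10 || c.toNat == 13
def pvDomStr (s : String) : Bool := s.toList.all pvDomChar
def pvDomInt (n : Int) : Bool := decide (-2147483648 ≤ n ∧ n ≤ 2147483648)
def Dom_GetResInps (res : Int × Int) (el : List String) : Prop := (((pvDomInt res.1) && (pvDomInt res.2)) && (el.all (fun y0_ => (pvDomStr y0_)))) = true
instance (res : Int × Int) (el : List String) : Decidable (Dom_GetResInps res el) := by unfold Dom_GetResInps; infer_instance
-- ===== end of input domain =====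

-- B replaces A's five unrolled nested-loop towers by one loop over the resolution
-- range clamped to 1..5 that grows k-letter concatenations iteratively (objective: simpler).

-- ===== PORT A =====
-- the while loop of A: resLoc runs from res.1 up to res.2, appending to ret
def GetResInpsGo (res2 : Int) (el : List String) (resLoc : Int) (ret : List String) : List String :=
  if resLoc ≤ res2 then
    let r1 := if resLoc = 1 then ret ++ el else ret
    let r2 := if resLoc = 2 then r1 ++ el.flatMap (fun i => el.map (fun j => i ++ j)) else r1
    let r3 := if resLoc = 3 then r2 ++ el.flatMap (fun i => el.flatMap (fun j => el.map (fun k => (i ++ j) ++ k))) else r2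
    let r4 := if resLoc = 4 then r3 ++ el.flatMap (fun i => el.flatMap (fun j => el.flatMap (fun k => el.map (fun l => ((i ++ j) ++ k) ++ l)))) else r3
    let r5 := if resLoc = 5 then r4 ++ el.flatMap (fun i => el.flatMap (fun j => el.flatMap (fun k => el.flatMap (fun l => el.map (fun o => (((i ++ j) ++ k) ++ l) ++ o))))) else r4
    GetResInpsGo res2 el (resLoc + 1) r5
  else ret
termination_by (res2 + 1 - resLoc).toNat
decreasing_by omega

def GetResInps (res : Int × Int) (el : List String) : List String :=
  GetResInpsGo res.2 el res.1 []

-- ===== PORT B =====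
-- Source B's inner loop: apply the comprehension step k times, starting from [""]
def altWords (el : List String) : Nat → List String
  | 0 => [""]
  | n + 1 => (altWords el n).flatMap (fun w => el.map (fun e => w ++ e))

def GetResInps_alt (res : Int × Int) (el : List String) : List String :=
  (PySem.List.pyRange (max res.1 1) (min res.2 5 + 1) 1).foldl
    (fun ret k => ret ++ altWords el k.toNat) []

-- ===== PRECONDITION & SPEC =====
def Spec_GetResInps (res : Int × Int) (el : List String) (out : List String) : Prop := out = GetResInps_alt res el
instance (res : Int × Int) (el : List String) (out : List String) : Decidable (Spec_GetResInps res el out) := by unfold Spec_GetResInps; infer_instance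

-- ===== CLAIM (what is proved, stated in full; the proofs are below) =====
def Claim_equal_GetResInps : Prop := ∀ (res : Int × Int) (el : List String), Dom_GetResInps res el → Spec_GetResInps res el (GetResInps res el)

-- ===== LEMMAS AND PROOFS =====

-- what one iteration of A's while body appends
def bodyA (resLoc : Int) (el : List String) : List String :=
  if resLoc = 1 then el
  else if resLoc = 2 then el.flatMap (fun i => el.map (fun j => i ++ j))
  else if resLoc = 3 then el.flatMap (fun i => el.flatMap (fun j => el.map (fun k => (i ++ j) ++ k)))
  else if resLoc = 4 then el.flatMap (fun i => el.flatMap (fun j => el.flatMap (fun k => el.map (fun l => ((i ++ j) ++ k) ++ l))))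
  else if resLoc = 5 then el.flatMap (fun i => el.flatMap (fun j => el.flatMap (fun k => el.flatMap (fun l => el.map (fun o => (((i ++ j) ++ k) ++ l) ++ o)))))
  else []

-- the suffix B still has to produce from position resLoc on
def altFrom (res2 : Int) (el : List String) (resLoc : Int) : List String :=
  (PySem.List.pyRange (max resLoc 1) (min res2 5 + 1) 1).foldl
    (fun ret k => ret ++ altWords el k.toNat) []

lemma foldl_append_init (g : Int → List String) (l : List Int) :
    ∀ init, l.foldl (fun acc k => acc ++ g k) init = init ++ l.foldl (fun acc k => acc ++ g k) [] := by
  induction l with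
  | nil => simp
  | cons x xs ih =>
    intro init
    simp only [List.foldl_cons, List.nil_append]
    rw [ih, ih (g x)]
    simp [List.append_assoc]

lemma pyRange_one_empty {a b : Int} (h : b ≤ a) : PySem.List.pyRange a b 1 = [] := by
  rw [PySem.List.pyRange_one]; simp; omega

lemma altWords_one (el : List String) : altWords el 1 = el := by
  simp [altWords, String.empty_append]

lemma altWords_two (el : List String) :
    altWords el 2 = el.flatMap (fun i => el.map (fun j => i ++ j)) := by
  show (altWords el 1).flatMap _ = _
  rw [altWords_one]

lemma altWords_three (el : List String) :
    altWords el 3 = el.flatMap (fun i => el.flatMap (fun j => el.map (fun k => (i ++ j) ++ k))) := by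
  show (altWords el 2).flatMap _ = _
  rw [altWords_two]; simp [List.flatMap_assoc, List.flatMap_map]

lemma altWords_four (el : List String) :
    altWords el 4 = el.flatMap (fun i => el.flatMap (fun j => el.flatMap (fun k => el.map (fun l => ((i ++ j) ++ k) ++ l)))) := by
  show (altWords el 3).flatMap _ = _
  rw [altWords_three]; simp [List.flatMap_assoc, List.flatMap_map]

lemma altWords_five (el : List String) :
    altWords el 5 = el.flatMap (fun i => el.flatMap (fun j => el.flatMap (fun k => el.flatMap (fun l => el.map (fun o => (((i ++ j) ++ k) ++ l) ++ o))))) := by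
  show (altWords el 4).flatMap _ = _
  rw [altWords_four]; simp [List.flatMap_assoc, List.flatMap_map]

lemma altFrom_step (res2 : Int) (el : List String) (resLoc : Int) (h : resLoc ≤ res2) :
    altFrom res2 el resLoc = bodyA resLoc el ++ altFrom res2 el (resLoc + 1) := by
  by_cases h1 : resLoc < 1
  · have hb : bodyA resLoc el = [] := by unfold bodyA; split_ifs <;> first | omega | rfl
    have : max resLoc 1 = max (resLoc + 1) 1 := by omega
    simp [altFrom, this, hb]
  · by_cases h5 : 5 < resLoc
    · have hb : bodyA resLoc el = [] := by unfold bodyA; split_ifs <;> first | omega | rfl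
      unfold altFrom
      rw [pyRange_one_empty (by omega), pyRange_one_empty (by omega)]
      simp [hb]
    · -- 1 ≤ resLoc ≤ 5 and resLoc ≤ res2
      have hmax : max resLoc 1 = resLoc := by omega
      have hmax' : max (resLoc + 1) 1 = resLoc + 1 := by omega
      have hlt : resLoc < min res2 5 + 1 := by omega
      unfold altFrom
      rw [hmax, hmax', PySem.List.pyRange_one_cons hlt]
      simp only [List.foldl_cons, List.nil_append]
      rw [foldl_append_init]
      congr 1
      -- bodyA resLoc el = altWords el resLoc.toNat for resLoc ∈ {1,2,3,4,5}
      interval_cases resLoc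
      · rw [show ((1:Int)).toNat = 1 from rfl, altWords_one]; rfl
      · rw [show ((2:Int)).toNat = 2 from rfl, altWords_two]; rfl
      · rw [show ((3:Int)).toNat = 3 from rfl, altWords_three]; rfl
      · rw [show ((4:Int)).toNat = 4 from rfl, altWords_four]; rfl
      · rw [show ((5:Int)).toNat = 5 from rfl, altWords_five]; rfl

lemma go_eq (res2 : Int) (el : List String) :
    ∀ (n : Nat) (resLoc : Int) (ret : List String), (res2 + 1 - resLoc).toNat ≤ n →
      GetResInpsGo res2 el resLoc ret = ret ++ altFrom res2 el resLoc := by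
  intro n
  induction n with
  | zero =>
    intro resLoc ret h
    have hgt : ¬ resLoc ≤ res2 := by omega
    rw [GetResInpsGo, if_neg hgt]
    unfold altFrom
    rw [pyRange_one_empty (by omega)]
    simp
  | succ n ih =>
    intro resLoc ret h
    by_cases hle : resLoc ≤ res2
    · rw [GetResInpsGo, if_pos hle, ih (resLoc + 1) _ (by omega), altFrom_step res2 el resLoc hle]
      unfold bodyA
      split_ifs <;> first | omega | simp [List.append_assoc]
    · rw [GetResInpsGo, if_neg hle]
      unfold altFrom
      rw [pyRange_one_empty (by omega)]
      simp

-- ===== VERDICT (by name: the statement is the Claim_ definition above) =====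
theorem GetResInps_spec : Claim_equal_GetResInps := by
  intro res el _
  unfold Spec_GetResInps GetResInps GetResInps_alt
  rw [go_eq res.2 el (res.2 + 1 - res.1).toNat res.1 [] le_rfl]
  simp [altFrom]
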